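-- pv_equiv track=rewrite | github.com/lisss/ntbts | algorithms/dynamic_programming.py | max_profit_k_tr_2
-- ===== SOURCE A (Python) =====
-- from typing import List
--
-- def max_profit_k_tr_2(k: int, prices: List[int]):
--     if 2*k >= len(prices):
--         return sum(max(0, prices[i]-prices[i-1]) for i in range(1, len(prices)))
--
--     pnl = [0]*len(prices)
--     for _ in range(k):
--         val = 0
--         for i in range(1, len(pnl)):
--             val = max(pnl[i], val + prices[i] - prices[i-1])
--             pnl[i] = max(pnl[i-1], val)
--     return pnl[-1]
-- ===== SOURCE B (Python) =====
-- from typing import List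
--
-- def max_profit_k_tr_2(k: int, prices: List[int]):
--     if 2 * k >= len(prices):
--         return sum(max(0, b - a) for a, b in zip(prices, prices[1:]))
--     if k <= 0:
--         return 0
--     # per-transaction (buy, sell) balances, updated once per price
--     states = [(-prices[0], 0)] * k
--     for p in prices:
--         prev_sell = 0
--         new_states = []
--         for buy, sell in states:
--             buy = max(buy, prev_sell - p)
--             sell = max(sell, buy + p)
--             new_states.append((buy, sell))
--             prev_sell = sell
--         states = new_states
--     return states[-1][1]
-- ===== Notes on version B (the rewrite author's own statement) =====
-- stated objective: alternative
-- what changed: A sweeps the whole pnl array once per transaction (k passes, each re-scanning all prices, mutating pnl in place); B makes a single left-to-right pass over prices maintaining per-transaction (buy, sell) balances threaded through the transaction levels, and short-circuits k <= 0 to 0.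
-- crash fix: On prices == [] with k < 0, A raises IndexError (pnl[-1] on an empty list) while B returns 0. — e.g. on max_profit_k_tr_2(-1, []): A raises IndexError, B returns 0
import Mathlib
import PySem

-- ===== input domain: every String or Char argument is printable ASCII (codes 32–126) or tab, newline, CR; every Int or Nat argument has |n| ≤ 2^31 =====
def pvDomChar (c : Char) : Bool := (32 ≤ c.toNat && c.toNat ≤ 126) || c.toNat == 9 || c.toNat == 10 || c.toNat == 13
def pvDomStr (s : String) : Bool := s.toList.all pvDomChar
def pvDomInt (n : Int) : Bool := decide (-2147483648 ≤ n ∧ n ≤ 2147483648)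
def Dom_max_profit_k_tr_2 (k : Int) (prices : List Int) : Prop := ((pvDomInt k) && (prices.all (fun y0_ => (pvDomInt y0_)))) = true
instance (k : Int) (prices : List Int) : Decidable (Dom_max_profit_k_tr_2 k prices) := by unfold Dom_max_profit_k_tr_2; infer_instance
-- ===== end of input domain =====

-- B replaces A's k sweeps over the whole pnl array by a single left-to-right pass over prices
-- maintaining per-transaction (buy, sell) balances (alternative decomposition, same asymptotic cost).

-- ===== PORT A =====
-- body of A's inner loop: val = max(pnl[i], val + prices[i] - prices[i-1]); pnl[i] = max(pnl[i-1], val)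
def aInner (prices : List Int) (st : List Int × Int) (i : Int) : List Int × Int :=
  let val := max (PySem.List.pyGetD st.1 i 0) (st.2 + PySem.List.pyGetD prices i 0 - PySem.List.pyGetD prices (i - 1) 0)
  (PySem.List.pySetD st.1 i (max (PySem.List.pyGetD st.1 (i - 1) 0) val), val)

-- one iteration of A's outer 'for _ in range(k)' loop
def aPass (prices : List Int) (pnl : List Int) : List Int :=
  ((PySem.List.pyRange 1 (pnl.length : Int) 1).foldl (aInner prices) (pnl, 0)).1

def max_profit_k_tr_2 (k : Int) (prices : List Int) : Int :=
  if 2 * k ≥ (prices.length : Int) then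
    (PySem.List.pyRange 1 (prices.length : Int) 1).foldl
      (fun acc i => acc + max 0 (PySem.List.pyGetD prices i 0 - PySem.List.pyGetD prices (i - 1) 0)) 0
  else
    PySem.List.pyGetD
      ((PySem.List.pyRange 0 k 1).foldl (fun pnl _ => aPass prices pnl)
        (List.replicate prices.length 0)) (-1) 0

-- ===== PORT B =====
-- one price folded into the per-transaction (buy, sell) states, threading prev_sell
def bUpdate (p : Int) (prevSell : Int) (states : List (Int × Int)) : List (Int × Int) :=
  match states with
  | [] => []
  | (buy, sell) :: rest =>
      let buy' := max buy (prevSell - p)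
      let sell' := max sell (buy' + p)
      (buy', sell') :: bUpdate p sell' rest

def max_profit_k_tr_2_alt (k : Int) (prices : List Int) : Int :=
  if 2 * k ≥ (prices.length : Int) then
    (prices.zip prices.tail).foldl (fun acc ab => acc + max 0 (ab.2 - ab.1)) 0
  else if k ≤ 0 then 0
  else
    (PySem.List.pyGetD
      (prices.foldl (fun st p => bUpdate p 0 st)
        (List.replicate k.toNat (-(PySem.List.pyGetD prices 0 0), (0 : Int)))) (-1) (0, 0)).2

-- ===== PRECONDITION & SPEC =====
-- Pre_ excludes only prices = [] with k < 0, where A's pnl[-1] raises IndexError on the empty list.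
def Pre_max_profit_k_tr_2 (k : Int) (prices : List Int) : Prop := prices ≠ [] ∨ 0 ≤ k
instance (k : Int) (prices : List Int) : Decidable (Pre_max_profit_k_tr_2 k prices) := by unfold Pre_max_profit_k_tr_2; infer_instance
def pvWitness_max_profit_k_tr_2 : Int × List Int := (2, [1, 5, 3])

-- On prices == [] with k < 0, A raises IndexError (pnl[-1] on the empty list) while B returns 0.
def Raises_max_profit_k_tr_2 (k : Int) (prices : List Int) : Prop := prices = [] ∧ k < 0
instance (k : Int) (prices : List Int) : Decidable (Raises_max_profit_k_tr_2 k prices) := by unfold Raises_max_profit_k_tr_2; infer_instance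
def pvRaiseWitness_max_profit_k_tr_2 : Int × List Int := (-1, [])
def pvRaiseWitnessOut_max_profit_k_tr_2 : Int := 0

def Spec_max_profit_k_tr_2 (k : Int) (prices : List Int) (out : Int) : Prop := out = max_profit_k_tr_2_alt k prices
instance (k : Int) (prices : List Int) (out : Int) : Decidable (Spec_max_profit_k_tr_2 k prices out) := by unfold Spec_max_profit_k_tr_2; infer_instance

-- ===== CLAIM (what is proved, stated in full; the proofs are below) =====
def Claim_equal_max_profit_k_tr_2 : Prop := ∀ (k : Int) (prices : List Int), Dom_max_profit_k_tr_2 k prices → Pre_max_profit_k_tr_2 k prices → Spec_max_profit_k_tr_2 k prices (max_profit_k_tr_2 k prices)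
def Claim_raises_max_profit_k_tr_2 : Prop := (∀ (k : Int) (prices : List Int), Dom_max_profit_k_tr_2 k prices → Raises_max_profit_k_tr_2 k prices → ¬ Pre_max_profit_k_tr_2 k prices) ∧ (Dom_max_profit_k_tr_2 (pvRaiseWitness_max_profit_k_tr_2.1) (pvRaiseWitness_max_profit_k_tr_2.2) ∧ Raises_max_profit_k_tr_2 (pvRaiseWitness_max_profit_k_tr_2.1) (pvRaiseWitness_max_profit_k_tr_2.2) ∧ max_profit_k_tr_2_alt (pvRaiseWitness_max_profit_k_tr_2.1) (pvRaiseWitness_max_profit_k_tr_2.2) = pvRaiseWitnessOut_max_profit_k_tr_2)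

-- ===== LEMMAS AND PROOFS =====

-- ---- shared mathematical recurrences (one row of A's DP / one transaction level of B's DP) ----

-- A's running 'val' during one pass, given the previous pass's row q
def mpVal (q pr : ℕ → Int) : ℕ → Int
  | 0 => 0
  | i + 1 => max (q (i + 1)) (mpVal q pr i + pr (i + 1) - pr i)

-- A's pnl row produced by one pass from row q
def mpRow (q pr : ℕ → Int) : ℕ → Int
  | 0 => 0
  | i + 1 => max (mpRow q pr i) (mpVal q pr (i + 1))

-- A's pnl after t passes
def mpPnl (pr : ℕ → Int) : ℕ → ℕ → Int
  | 0 => fun _ => 0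
  | t + 1 => mpRow (mpPnl pr t) pr

-- B's buy balance for one transaction level, given the previous level's sell row s
def mpBuy (s pr : ℕ → Int) : ℕ → Int
  | 0 => max (-(pr 0)) (s 0 - pr 0)
  | i + 1 => max (mpBuy s pr i) (s (i + 1) - pr (i + 1))

-- B's sell balance for one transaction level
def mpSell (s pr : ℕ → Int) : ℕ → Int
  | 0 => max 0 (mpBuy s pr 0 + pr 0)
  | i + 1 => max (mpSell s pr i) (mpBuy s pr (i + 1) + pr (i + 1))

-- B's sell row after j transaction levels
def mpSB (pr : ℕ → Int) : ℕ → ℕ → Int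
  | 0 => fun _ => 0
  | j + 1 => mpSell (mpSB pr j) pr

def mpPr (prices : List Int) : ℕ → Int := fun i => prices.getD i 0

def mpState (pr : ℕ → Int) (j i : ℕ) : Int × Int := (mpBuy (mpSB pr j) pr i, mpSell (mpSB pr j) pr i)

-- A's pnl list after t passes
def mpL (prices : List Int) (t : ℕ) : List Int := (List.range prices.length).map (mpPnl (mpPr prices) t)

-- A's pnl list in the middle of pass t+1, updated through index m
def mpLM (prices : List Int) (t m : ℕ) : List Int :=
  (List.range prices.length).map (fun i => if i ≤ m then mpPnl (mpPr prices) (t + 1) i else mpPnl (mpPr prices) t i)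

-- B's states list after processing prices[0..i]
def mpS (prices : List Int) (K i : ℕ) : List (Int × Int) := (List.range K).map (fun j => mpState (mpPr prices) j i)

-- the sum of positive consecutive differences (branch 1 of both programs)
def mpGain : List Int → Int
  | a :: b :: rest => max 0 (b - a) + mpGain (b :: rest)
  | _ => 0

-- ---- core equivalence of the two recurrences ----

lemma mpPnl_zero (pr : ℕ → Int) (t : ℕ) : mpPnl pr t 0 = 0 := by
  cases t <;> rfl

lemma mp_row_core (q pr : ℕ → Int) (hq0 : q 0 = 0) :
    ∀ i, mpBuy q pr i + pr i = mpVal q pr i ∧ mpSell q pr i = mpRow q pr i := by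
  intro i
  induction i with
  | zero =>
      have hb : mpBuy q pr 0 + pr 0 = mpVal q pr 0 := by
        simp only [mpBuy, mpVal, hq0]
        simp
      refine ⟨hb, ?_⟩
      simp only [mpSell, mpRow, hb]
      simp [mpVal]
  | succ i ih =>
      have h1 := ih.1
      have hbuy : mpBuy q pr (i + 1) + pr (i + 1) = mpVal q pr (i + 1) := by
        simp only [mpBuy, mpVal]
        simp only [max_def]
        split_ifs <;> omega
      exact ⟨hbuy, by simp only [mpSell, mpRow, ih.2, hbuy]⟩

lemma mpSB_eq (pr : ℕ → Int) : ∀ t, mpSB pr t = mpPnl pr t := by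
  intro t
  induction t with
  | zero => rfl
  | succ t ih =>
      funext i
      have h := mp_row_core (mpPnl pr t) pr (mpPnl_zero pr t) i
      simp only [mpSB, mpPnl, ih, h.2]

-- ---- branch 1: both folds compute mpGain ----

lemma mp_zipfold (l : List Int) : ∀ acc : Int,
    (l.zip l.tail).foldl (fun acc ab => acc + max 0 (ab.2 - ab.1)) acc = acc + mpGain l := by
  induction l with
  | nil => intro acc; simp [mpGain]
  | cons a t ih =>
      intro acc
      cases t with
      | nil => simp [mpGain]
      | cons b r =>
          simp only [List.tail_cons, List.zip_cons_cons, List.foldl_cons]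
          have := ih (acc + max 0 (b - a))
          simp only [List.tail_cons] at this
          rw [this]
          simp [mpGain]; ring

lemma mp_foldNat : ∀ (t : List Int) (a acc : Int),
    (List.range t.length).foldl (fun acc k => acc + max 0 (t.getD k 0 - (a :: t).getD k 0)) acc
      = acc + mpGain (a :: t) := by
  intro t
  induction t with
  | nil => intro a acc; simp [mpGain]
  | cons b r ih =>
      intro a acc
      rw [List.length_cons, List.range_succ_eq_map, List.foldl_cons, List.foldl_map]
      simp only [List.getD_cons_zero, List.getD_cons_succ]
      rw [ih b (acc + max 0 (b - a))]
      simp [mpGain]; ring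

lemma mp_branch1 (prices : List Int) :
    (PySem.List.pyRange 1 (prices.length : Int) 1).foldl
      (fun acc i => acc + max 0 (PySem.List.pyGetD prices i 0 - PySem.List.pyGetD prices (i - 1) 0)) 0
    = (prices.zip prices.tail).foldl (fun acc ab => acc + max 0 (ab.2 - ab.1)) 0 := by
  rw [mp_zipfold prices 0]
  cases prices with
  | nil => simp [PySem.List.pyRange_one_eq_nil, mpGain]
  | cons a t =>
      rw [PySem.List.pyRange_one]
      simp only [List.foldl_map]
      have hlen : (((a :: t).length : Int) - 1).toNat = t.length := by
        simp [List.length_cons]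
      rw [hlen]
      refine Eq.trans (List.foldl_ext _ (fun acc k => acc + max 0 (t.getD k 0 - (a :: t).getD k 0)) 0 ?_) (mp_foldNat t a 0)
      intro acc k _
      have h2 : (1 + (k : Int) - 1) = ((k : ℕ) : Int) := by omega
      have h1 : (1 + (k : Int)) = ((k + 1 : ℕ) : Int) := by push_cast; ring
      rw [h2, h1, PySem.List.pyGetD_natCast, PySem.List.pyGetD_natCast, List.getD_cons_succ]

-- ---- A-side bridge ----

lemma mp_getD_map_range (f : ℕ → Int) (n k : ℕ) (h : k < n) :
    ((List.range n).map f).getD k 0 = f k := by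
  rw [List.getD_eq_getElem?_getD, List.getElem?_map]
  simp [h]

lemma mp_set_map_range (f : ℕ → Int) (n j : ℕ) (v : Int) (h : j < n) :
    ((List.range n).map f).set j v = (List.range n).map (fun i => if i = j then v else f i) := by
  apply List.ext_getElem
  · simp
  · intro i h1 h2
    simp only [List.length_set, List.length_map, List.length_range] at h1
    simp [List.getElem_set, List.getElem_map, List.getElem_range]
    rcases eq_or_ne i j with rfl | hne
    · simp
    · simp [hne, Ne.symm hne]

lemma mp_inner (prices : List Int) (t : ℕ) :
    ∀ (c m : ℕ), m + 1 + c = prices.length →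
    (PySem.List.pyRange ((m : Int) + 1) (prices.length : Int) 1).foldl (aInner prices)
      (mpLM prices t m, mpVal (mpPnl (mpPr prices) t) (mpPr prices) m)
    = (mpLM prices t (m + c), mpVal (mpPnl (mpPr prices) t) (mpPr prices) (m + c)) := by
  intro c
  induction c with
  | zero =>
      intro m hm
      have : PySem.List.pyRange ((m : Int) + 1) (prices.length : Int) 1 = [] := by
        apply PySem.List.pyRange_one_eq_nil; omega
      simp [this]
  | succ c ih =>
      intro m hm
      have hlt : ((m : Int) + 1) < (prices.length : Int) := by
        have : m + 1 < prices.length := by omega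
        exact_mod_cast this
      rw [PySem.List.pyRange_one_cons hlt, List.foldl_cons]
      have hm1 : m + 1 < prices.length := by omega
      -- evaluate aInner at index m+1
      have hcast1 : ((m : Int) + 1) = ((m + 1 : ℕ) : Int) := by push_cast; ring
      have hcast2 : ((m : Int) + 1 - 1) = ((m : ℕ) : Int) := by omega
      have hcast2' : (((m + 1 : ℕ) : Int)) - 1 = ((m : ℕ) : Int) := by push_cast; ring
      have hstep : aInner prices (mpLM prices t m, mpVal (mpPnl (mpPr prices) t) (mpPr prices) m) ((m : Int) + 1)
          = (mpLM prices t (m + 1), mpVal (mpPnl (mpPr prices) t) (mpPr prices) (m + 1)) := by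
        unfold aInner
        simp only [hcast1, hcast2', PySem.List.pyGetD_natCast, PySem.List.pySetD_natCast]
        have e1 : (mpLM prices t m).getD (m + 1) 0 = mpPnl (mpPr prices) t (m + 1) := by
          unfold mpLM
          rw [mp_getD_map_range _ _ _ hm1]
          simp [Nat.not_succ_le_self m]
        have e2 : (mpLM prices t m).getD m 0 = mpPnl (mpPr prices) (t + 1) m := by
          unfold mpLM
          rw [mp_getD_map_range _ _ _ (by omega)]
          simp
        have e3 : prices.getD (m + 1) 0 = mpPr prices (m + 1) := rfl
        have e4 : prices.getD m 0 = mpPr prices m := rfl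
        rw [e1, e2, e3, e4]
        have hval : max (mpPnl (mpPr prices) t (m + 1))
              (mpVal (mpPnl (mpPr prices) t) (mpPr prices) m + mpPr prices (m + 1) - mpPr prices m)
            = mpVal (mpPnl (mpPr prices) t) (mpPr prices) (m + 1) := rfl
        rw [hval]
        have hset : max (mpPnl (mpPr prices) (t + 1) m) (mpVal (mpPnl (mpPr prices) t) (mpPr prices) (m + 1))
            = mpPnl (mpPr prices) (t + 1) (m + 1) := rfl
        rw [hset]
        unfold mpLM
        rw [mp_set_map_range _ _ _ _ hm1]
        congr 1
        apply List.map_congr_left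
        intro i hi
        rcases eq_or_ne i (m + 1) with rfl | hne
        · simp
        · have : (i ≤ m + 1) ↔ (i ≤ m) := by omega
          simp [hne, this]
      rw [hstep]
      have hcast3 : ((m : Int) + 1 + 1) = (((m + 1 : ℕ) : Int) + 1) := by push_cast; ring
      rw [hcast3, ih (m + 1) (by omega)]
      have : m + 1 + c = m + (c + 1) := by omega
      rw [this]

lemma mp_pass (prices : List Int) (t : ℕ) : aPass prices (mpL prices t) = mpL prices (t + 1) := by
  unfold aPass
  have hlen : (mpL prices t).length = prices.length := by simp [mpL]
  rw [hlen]
  rcases Nat.eq_zero_or_pos prices.length with h0 | hpos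
  · have : PySem.List.pyRange 1 (prices.length : Int) 1 = [] := by
      apply PySem.List.pyRange_one_eq_nil; omega
    simp [mpL, h0]
  · have hL0 : mpL prices t = mpLM prices t 0 := by
      unfold mpL mpLM
      apply List.map_congr_left
      intro i _
      rcases Nat.eq_zero_or_pos i with rfl | hi
      · simp [mpPnl_zero]
      · rw [if_neg (by omega : ¬ i ≤ 0)]
    have hinner := mp_inner prices t (prices.length - 1) 0 (by omega)
    norm_num at hinner
    simp only [mpVal] at hinner
    rw [hL0, hinner]
    unfold mpLM mpL
    apply List.map_congr_left
    intro i hi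
    simp only [List.mem_range] at hi
    rw [if_pos (by omega : i ≤ prices.length - 1)]

lemma mp_foldl_const {α β : Type} (f : α → α) :
    ∀ (l : List β) (x : α), l.foldl (fun s _ => f s) x = f^[l.length] x := by
  intro l
  induction l with
  | nil => intro x; rfl
  | cons a l ih =>
      intro x
      rw [List.foldl_cons, ih (f x), List.length_cons, Function.iterate_succ_apply]

lemma mp_iterA (prices : List Int) : ∀ t : ℕ, (aPass prices)^[t] (mpL prices 0) = mpL prices t := by
  intro t
  induction t with
  | zero => rfl
  | succ t ih => rw [Function.iterate_succ_apply', ih, mp_pass]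

lemma mp_A_fold (prices : List Int) (k : Int) :
    (PySem.List.pyRange 0 k 1).foldl (fun pnl _ => aPass prices pnl) (List.replicate prices.length 0)
      = mpL prices k.toNat := by
  have hinit : List.replicate prices.length (0 : Int) = mpL prices 0 := by
    unfold mpL
    rw [show mpPnl (mpPr prices) 0 = fun _ => (0 : Int) from rfl]
    rw [List.map_const']
    simp
  rw [hinit, mp_foldl_const (aPass prices)]
  rw [show (PySem.List.pyRange 0 k 1).length = k.toNat by rw [PySem.List.length_pyRange_one]; norm_num]
  exact mp_iterA prices k.toNat

-- ---- B-side bridge ----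

lemma mp_bUpdate_init (prices : List Int) :
    ∀ (m jo : ℕ),
      bUpdate (mpPr prices 0) (mpSB (mpPr prices) jo 0) (List.replicate m (-(mpPr prices 0), (0 : Int)))
        = (List.range m).map (fun j => mpState (mpPr prices) (jo + j) 0) := by
  intro m
  induction m with
  | zero => intro jo; rfl
  | succ m ih =>
      intro jo
      rw [List.replicate_succ, List.range_succ_eq_map, List.map_cons]
      rw [show bUpdate (mpPr prices 0) (mpSB (mpPr prices) jo 0)
            ((-(mpPr prices 0), (0:Int)) :: List.replicate m (-(mpPr prices 0), (0:Int)))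
          = (max (-(mpPr prices 0)) (mpSB (mpPr prices) jo 0 - mpPr prices 0),
             max 0 (max (-(mpPr prices 0)) (mpSB (mpPr prices) jo 0 - mpPr prices 0) + mpPr prices 0)) ::
            bUpdate (mpPr prices 0)
              (max 0 (max (-(mpPr prices 0)) (mpSB (mpPr prices) jo 0 - mpPr prices 0) + mpPr prices 0))
              (List.replicate m (-(mpPr prices 0), (0:Int))) from rfl]
      have hb : max (-(mpPr prices 0)) (mpSB (mpPr prices) jo 0 - mpPr prices 0)
          = mpBuy (mpSB (mpPr prices) jo) (mpPr prices) 0 := rfl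
      have hs : max 0 (mpBuy (mpSB (mpPr prices) jo) (mpPr prices) 0 + mpPr prices 0)
          = mpSell (mpSB (mpPr prices) jo) (mpPr prices) 0 := rfl
      rw [hb, hs]
      have hnext : mpSell (mpSB (mpPr prices) jo) (mpPr prices) 0 = mpSB (mpPr prices) (jo + 1) 0 := rfl
      rw [hnext, ih (jo + 1), List.map_map]
      refine congrArg₂ _ rfl ?_
      apply List.map_congr_left
      intro j _
      simp only [Function.comp]
      congr 1
      omega

lemma mp_bUpdate_step (prices : List Int) (i : ℕ) :
    ∀ (m jo : ℕ),
      bUpdate (mpPr prices (i + 1)) (mpSB (mpPr prices) jo (i + 1))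
          ((List.range m).map (fun j => mpState (mpPr prices) (jo + j) i))
        = (List.range m).map (fun j => mpState (mpPr prices) (jo + j) (i + 1)) := by
  intro m
  induction m with
  | zero => intro jo; rfl
  | succ m ih =>
      intro jo
      rw [List.range_succ_eq_map, List.map_cons, List.map_cons, List.map_map, List.map_map]
      rw [show (jo + 0) = jo from rfl]
      rw [show bUpdate (mpPr prices (i + 1)) (mpSB (mpPr prices) jo (i + 1))
            (mpState (mpPr prices) jo i :: ((List.range m).map ((fun j => mpState (mpPr prices) (jo + j) i) ∘ (· + 1))))
          = (max (mpState (mpPr prices) jo i).1 (mpSB (mpPr prices) jo (i + 1) - mpPr prices (i + 1)),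
             max (mpState (mpPr prices) jo i).2
               (max (mpState (mpPr prices) jo i).1 (mpSB (mpPr prices) jo (i + 1) - mpPr prices (i + 1)) + mpPr prices (i + 1))) ::
            bUpdate (mpPr prices (i + 1))
              (max (mpState (mpPr prices) jo i).2
                (max (mpState (mpPr prices) jo i).1 (mpSB (mpPr prices) jo (i + 1) - mpPr prices (i + 1)) + mpPr prices (i + 1)))
              ((List.range m).map ((fun j => mpState (mpPr prices) (jo + j) i) ∘ (· + 1))) from rfl]
      have hb : max (mpState (mpPr prices) jo i).1 (mpSB (mpPr prices) jo (i + 1) - mpPr prices (i + 1))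
          = mpBuy (mpSB (mpPr prices) jo) (mpPr prices) (i + 1) := rfl
      have hs : max (mpState (mpPr prices) jo i).2
            (mpBuy (mpSB (mpPr prices) jo) (mpPr prices) (i + 1) + mpPr prices (i + 1))
          = mpSell (mpSB (mpPr prices) jo) (mpPr prices) (i + 1) := rfl
      rw [hb, hs]
      have hshift : ((List.range m).map ((fun j => mpState (mpPr prices) (jo + j) i) ∘ (· + 1)))
          = (List.range m).map (fun j => mpState (mpPr prices) ((jo + 1) + j) i) := by
        apply List.map_congr_left
        intro j _
        simp only [Function.comp]
        congr 1
        omega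
      rw [hshift, show mpSell (mpSB (mpPr prices) jo) (mpPr prices) (i + 1) = mpSB (mpPr prices) (jo + 1) (i + 1) from rfl,
        ih (jo + 1)]
      refine congrArg₂ _ rfl ?_
      apply List.map_congr_left
      intro j _
      simp only [Function.comp]
      congr 1
      omega

lemma mp_B_fold (prices : List Int) (K : ℕ) :
    ∀ (c i : ℕ), i + c + 1 = prices.length →
      (prices.drop (i + 1)).foldl (fun st p => bUpdate p 0 st) (mpS prices K i)
        = mpS prices K (prices.length - 1) := by
  intro c
  induction c with
  | zero =>
      intro i hi
      rw [show i + 1 = prices.length by omega, List.drop_length]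
      simp [show prices.length - 1 = i by omega]
  | succ c ih =>
      intro i hi
      have hlt : i + 1 < prices.length := by omega
      rw [List.drop_eq_getElem_cons hlt, List.foldl_cons]
      have hget : prices[i + 1] = mpPr prices (i + 1) := by
        unfold mpPr
        rw [List.getD_eq_getElem?_getD, List.getElem?_eq_getElem hlt]
        rfl
      have hstep := mp_bUpdate_step prices i K 0
      simp only [Nat.zero_add] at hstep
      rw [show mpSB (mpPr prices) 0 (i + 1) = (0 : Int) from rfl] at hstep
      rw [hget]
      unfold mpS
      rw [hstep]
      have := ih (i + 1) (by omega)
      unfold mpS at this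
      exact this

-- ---- final extraction helpers ----

lemma mp_last_map_range {α : Type} [Inhabited α] (f : ℕ → α) (n : ℕ) (hn : 0 < n) (d : α) :
    PySem.List.pyGetD ((List.range n).map f) (-1) d = f (n - 1) := by
  have hne : (List.range n).map f ≠ [] := by
    simp [List.map_eq_nil_iff, List.range_eq_nil]; omega
  rw [PySem.List.pyGetD_neg_one _ _ hne, List.getLast_eq_getElem]
  simp [List.getElem_map, List.getElem_range]

-- ===== VERDICT (by name: the statement is the Claim_ definition above) =====
theorem max_profit_k_tr_2_spec : Claim_equal_max_profit_k_tr_2 := by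
  intro k prices _ hpre
  unfold Spec_max_profit_k_tr_2 max_profit_k_tr_2 max_profit_k_tr_2_alt
  by_cases hbr : 2 * k ≥ (prices.length : Int)
  · simp only [hbr, if_pos]
    exact mp_branch1 prices
  · simp only [hbr, if_false]
    have hn1 : 0 < prices.length := by
      rcases Nat.eq_zero_or_pos prices.length with h0 | h
      · exfalso
        rcases hpre with hne | hk
        · exact hne (List.eq_nil_of_length_eq_zero h0)
        · apply hbr; rw [h0]; push_cast; omega
      · exact h
    by_cases hk : k ≤ 0
    · simp only [hk, if_pos]
      have hempty : PySem.List.pyRange 0 k 1 = [] := by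
        apply PySem.List.pyRange_one_eq_nil; omega
      rw [hempty, List.foldl_nil]
      have hne : List.replicate prices.length (0 : Int) ≠ [] := by
        simp only [ne_eq, List.replicate_eq_nil_iff]
        omega
      rw [PySem.List.pyGetD_neg_one _ _ hne]
      simp [List.getLast_replicate]
    · simp only [hk, if_false]
      have hK : 0 < k.toNat := by omega
      -- A side
      rw [mp_A_fold prices k]
      unfold mpL
      rw [mp_last_map_range _ _ hn1]
      -- B side
      have hinit : (-(PySem.List.pyGetD prices 0 0), (0 : Int)) = (-(mpPr prices 0), (0 : Int)) := by
        rw [PySem.List.pyGetD_zero]; rfl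
      rw [hinit]
      have hget0 : prices[0]'hn1 = mpPr prices 0 := by
        unfold mpPr
        rw [List.getD_eq_getElem?_getD, List.getElem?_eq_getElem hn1]
        rfl
      have hd := List.drop_eq_getElem_cons (l := prices) hn1
      simp only [List.drop_zero, Nat.zero_add] at hd
      have hcons : ∀ init : List (Int × Int), prices.foldl (fun st p => bUpdate p 0 st) init
          = (prices.drop 1).foldl (fun st p => bUpdate p 0 st) (bUpdate (mpPr prices 0) 0 init) := by
        intro init
        conv_lhs => rw [hd]
        rw [List.foldl_cons, hget0]
      rw [hcons _]
      have hstart := mp_bUpdate_init prices k.toNat 0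
      simp only [Nat.zero_add] at hstart
      rw [show mpSB (mpPr prices) 0 0 = (0 : Int) from rfl] at hstart
      rw [hstart]
      have hfold := mp_B_fold prices k.toNat (prices.length - 1) 0 (by omega)
      unfold mpS at hfold
      simp only [Nat.zero_add] at hfold
      rw [hfold, mp_last_map_range _ _ hK]
      unfold mpState
      have hsell : mpSell (mpSB (mpPr prices) (k.toNat - 1)) (mpPr prices) (prices.length - 1)
          = mpSB (mpPr prices) k.toNat (prices.length - 1) := by
        rw [show k.toNat = (k.toNat - 1) + 1 by omega]
        rfl
      rw [show (mpBuy (mpSB (mpPr prices) (k.toNat - 1)) (mpPr prices) (prices.length - 1),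
            mpSell (mpSB (mpPr prices) (k.toNat - 1)) (mpPr prices) (prices.length - 1)).2
          = mpSell (mpSB (mpPr prices) (k.toNat - 1)) (mpPr prices) (prices.length - 1) from rfl]
      rw [hsell, mpSB_eq]

@[simp] theorem max_profit_k_tr_2_raises : Claim_raises_max_profit_k_tr_2 := by
  unfold Claim_raises_max_profit_k_tr_2
  constructor
  · intro k prices _ hr hpre
    rcases hpre with hne | hk
    · exact hne hr.1
    · have h2 := hr.2
      omega
  · exact ⟨by decide, by decide, by decide⟩
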